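-- pv_equiv track=rewrite | github.com/bryanrose75/Trade_King | positive_check.py | validate_float_format
-- ===== SOURCE A (Python) =====
-- def validate_float_format(text: str) -> bool:
--
--     if text == "":
--         return True
--
--     if all(positive_float in "0123456789." for positive_float in text) and text.count(".") <= 1:
--         try:
--             float(text)
--             return True
--         except ValueError:
--             return False
--
--     else:
--         return False
-- ===== SOURCE B (Python) =====
-- def validate_float_format(text: str) -> bool:
--     # Single pass: reject any char outside digits/'.', count dots, note digits.
--     if text == "":
--         return True
--     dots = 0
--     saw_digit = False
--     for c in text:
--         if c == '.':
--             dots += 1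
--         elif '0' <= c <= '9':
--             saw_digit = True
--         else:
--             return False
--     return dots <= 1 and saw_digit
-- ===== Notes on version B (the rewrite author's own statement) =====
-- stated objective: simpler
-- what changed: B replaces A's three separate passes (an all() membership scan, a dot-count pass, and a try-float) with one character loop keeping a dot counter and a saw-digit flag, deciding the predicate directly with no exception handling.
import Mathlib
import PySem

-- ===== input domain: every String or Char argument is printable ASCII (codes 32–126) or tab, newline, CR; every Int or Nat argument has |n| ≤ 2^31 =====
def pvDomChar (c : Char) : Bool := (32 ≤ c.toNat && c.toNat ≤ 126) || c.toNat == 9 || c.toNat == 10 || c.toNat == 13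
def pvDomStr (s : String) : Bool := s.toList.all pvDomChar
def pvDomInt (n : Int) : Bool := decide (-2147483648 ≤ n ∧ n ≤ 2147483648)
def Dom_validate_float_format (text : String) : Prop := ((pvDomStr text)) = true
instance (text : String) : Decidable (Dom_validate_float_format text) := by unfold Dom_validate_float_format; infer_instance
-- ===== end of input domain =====

-- B changes: one character loop with a dot counter and a saw-digit flag instead of
-- A's all()-membership scan + count('.') + try-float; same return value everywhere.

-- ===== PORT A =====
def validate_float_format (text : String) : Bool :=
  if text == "" then true
  else if (text.toList.all (fun positive_float =>
            PySem.Chars.isIn [positive_float] "0123456789.".toList)) &&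
          decide (PySem.Str.count text "." ≤ 1) then
    -- float(text): here text is non-empty, every char is a digit or '.', and there is
    -- at most one '.'; on exactly these strings float() succeeds iff some digit occurs
    -- (the only guarded strings float() rejects are those with no digit at all),
    -- so this step is exact on the guarded domain.
    if text.toList.any PySem.Chars.isdigit then true else false
  else false

-- ===== PORT B =====
def vffAltLoop : List Char → Nat → Bool → Bool
  | [], dots, saw_digit => decide (dots ≤ 1) && saw_digit
  | c :: rest, dots, saw_digit =>
    if c == '.' then vffAltLoop rest (dots + 1) saw_digit
    else if decide ('0' ≤ c) && decide (c ≤ '9') then vffAltLoop rest dots true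
    else false

def validate_float_format_alt (text : String) : Bool :=
  if text == "" then true
  else vffAltLoop text.toList 0 false

-- ===== PRECONDITION & SPEC =====
def Spec_validate_float_format (text : String) (out : Bool) : Prop := out = validate_float_format_alt text
instance (text : String) (out : Bool) : Decidable (Spec_validate_float_format text out) := by unfold Spec_validate_float_format; infer_instance

-- ===== CLAIM (what is proved, stated in full; the proofs are below) =====
def Claim_equal_validate_float_format : Prop := ∀ (text : String), Dom_validate_float_format text → Spec_validate_float_format text (validate_float_format text)

-- ===== LEMMAS AND PROOFS =====

lemma vff_char_eq_iff (c d : Char) : c = d ↔ c.toNat = d.toNat :=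
  ⟨fun h => congrArg Char.toNat h, fun h => Char.ext (UInt32.toNat_inj.mp h)⟩

lemma vff_char_le_iff (c d : Char) : c ≤ d ↔ c.toNat ≤ d.toNat := by
  rw [Char.le_def, UInt32.le_iff_toNat_le]; rfl

lemma vff_singleton_infix (c : Char) (l : List Char) : [c] <:+: l ↔ c ∈ l := by
  constructor
  · intro h; exact List.singleton_sublist.mp h.sublist
  · intro h
    obtain ⟨s, t, rfl⟩ := List.append_of_mem h
    exact ⟨s, t, by simp⟩

-- each character is in "0123456789." iff it is '.' or a digit
lemma vff_char_class (c : Char) :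
    PySem.Chars.isIn [c] "0123456789.".toList =
      (c == '.' || (decide ('0' ≤ c) && decide (c ≤ '9'))) := by
  rw [Bool.eq_iff_iff, PySem.Chars.isIn_iff_infix, vff_singleton_infix,
    show "0123456789.".toList = ['0','1','2','3','4','5','6','7','8','9','.'] from rfl]
  simp only [Bool.or_eq_true, Bool.and_eq_true, decide_eq_true_eq, beq_iff_eq,
    List.mem_cons, List.not_mem_nil, or_false]
  simp only [vff_char_eq_iff, vff_char_le_iff,
    show ('0' : Char).toNat = 48 from rfl, show ('1' : Char).toNat = 49 from rfl,
    show ('2' : Char).toNat = 50 from rfl, show ('3' : Char).toNat = 51 from rfl,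
    show ('4' : Char).toNat = 52 from rfl, show ('5' : Char).toNat = 53 from rfl,
    show ('6' : Char).toNat = 54 from rfl, show ('7' : Char).toNat = 55 from rfl,
    show ('8' : Char).toNat = 56 from rfl, show ('9' : Char).toNat = 57 from rfl,
    show ('.' : Char).toNat = 46 from rfl]
  omega

lemma vff_count_go (l : List Char) (fuel acc : Nat) (h : l.length ≤ fuel) :
    PySem.Chars.count.go ['.'] fuel l acc = acc + l.count '.' := by
  induction l generalizing fuel acc with
  | nil => cases fuel <;> simp [PySem.Chars.count.go]
  | cons c t ih =>
    cases fuel with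
    | zero => simp at h
    | succ f =>
      simp only [PySem.Chars.count.go]
      by_cases hc : c = '.'
      · rw [if_pos (by simp [hc, List.isPrefixOf])]
        simp only [List.length_singleton, List.drop_one, List.tail_cons]
        rw [ih f (acc + 1) (by simpa using h)]
        simp [hc]; omega
      · rw [if_neg (by simp [List.isPrefixOf]; exact fun h => hc h.symm)]
        rw [ih f acc (by simpa using h)]
        simp [hc]

-- single-char count is list count
lemma vff_count_dot (s : String) :
    PySem.Str.count s "." = s.toList.count '.' := by
  rw [show PySem.Str.count s "." = PySem.Chars.count s.toList ['.'] from rfl]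
  rw [show PySem.Chars.count s.toList ['.']
        = PySem.Chars.count.go ['.'] s.toList.length s.toList 0 from rfl]
  simpa using vff_count_go s.toList s.toList.length 0 le_rfl

-- characterisation of the B loop
lemma vffAltLoop_spec (l : List Char) (dots : Nat) (saw : Bool) :
    vffAltLoop l dots saw =
      (l.all (fun c => c == '.' || (decide ('0' ≤ c) && decide (c ≤ '9'))) &&
       decide (dots + l.count '.' ≤ 1) &&
       (saw || l.any (fun c => decide ('0' ≤ c) && decide (c ≤ '9')))) := by
  induction l generalizing dots saw with
  | nil => simp [vffAltLoop]
  | cons c t ih =>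
    simp only [vffAltLoop]
    by_cases hc : c = '.'
    · rw [if_pos (by simp [hc]), ih]
      subst hc
      simp
      rw [show dots + 1 + List.count '.' t = dots + (List.count '.' t + 1) from by omega]
    · rw [if_neg (by simp [hc])]
      by_cases hd : (decide ('0' ≤ c) && decide (c ≤ '9')) = true
      · rw [if_pos hd, ih]
        simp [hd, hc]
      · rw [if_neg hd]
        simp [List.all_cons, hd, hc]

-- ===== VERDICT (by name: the statement is the Claim_ definition above) =====
theorem validate_float_format_spec : Claim_equal_validate_float_format := by
  intro text _
  unfold Spec_validate_float_format validate_float_format validate_float_format_alt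
  by_cases h : text = ""
  · simp [h]
  · have hne : (text == "") = false := by simpa using h
    rw [vff_count_dot, vffAltLoop_spec]
    simp only [hne]
    simp only [vff_char_class, Nat.zero_add, Bool.false_or]
    rw [show text.toList.any PySem.Chars.isdigit
          = text.toList.any (fun c => decide ('0' ≤ c) && decide (c ≤ '9')) from rfl]
    by_cases hall : text.toList.all (fun c => c == '.' || (decide ('0' ≤ c) && decide (c ≤ '9'))) = true
    · by_cases hc : text.toList.count '.' ≤ 1
      · cases hx : text.toList.any (fun c => decide ('0' ≤ c) && decide (c ≤ '9')) <;>
          simp [hall, hc]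
      · simp [hall, hc]
    · simp [hall]
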